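-- pv_equiv track=rewrite | github.com/AnthonyCalo/PythonAlgorithms | frog_jump_ii.py | maxJump
-- ===== SOURCE A (Python) =====
-- def maxJump(stones):
--     """
--     :type stones: List[int]
--     :rtype: int
--     """
--     if(len(stones) in  [2,3]):
--         return stones[-1] - stones[0]
--
--     mj = 0
--     for i in range(len(stones)-2):
--         jump = stones[i +2] - stones[i]
--         mj = max(mj, jump)
--
--     return mj
-- ===== SOURCE B (Python) =====
-- def maxJump(stones):
--     if len(stones) in (2, 3):
--         return stones[-1] - stones[0]
--     ev, od = [], []
--     take_ev = True
--     for x in stones: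
--         if take_ev:
--             ev.append(x)
--         else:
--             od.append(x)
--         take_ev = not take_ev
--     best = 0
--     for seq in (ev, od):
--         for a, b in zip(seq, seq[1:]):
--             best = max(best, b - a)
--     return best
-- ===== Notes on version B (the rewrite author's own statement) =====
-- stated objective: alternative
-- what changed: Instead of A's single indexed pass over pairs two apart, B partitions the stones into the two alternating subsequences (even/odd positions) with a bucket loop and then takes the maximum adjacent gap within each subsequence.
import Mathlib
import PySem

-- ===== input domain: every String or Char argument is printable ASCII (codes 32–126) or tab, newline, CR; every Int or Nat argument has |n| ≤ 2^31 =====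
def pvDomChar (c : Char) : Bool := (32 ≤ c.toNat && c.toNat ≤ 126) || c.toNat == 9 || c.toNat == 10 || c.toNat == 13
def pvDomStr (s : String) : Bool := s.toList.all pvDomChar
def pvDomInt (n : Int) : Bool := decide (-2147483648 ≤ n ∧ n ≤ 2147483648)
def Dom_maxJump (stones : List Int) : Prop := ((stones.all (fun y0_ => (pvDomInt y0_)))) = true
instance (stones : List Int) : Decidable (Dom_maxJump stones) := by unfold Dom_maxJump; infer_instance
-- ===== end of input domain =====

-- B partitions the stones into the two alternating subsequences and scans adjacent
-- gaps in each (alternative decomposition, same cost); A scans index pairs two apart.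

-- ===== PORT A =====
-- literal port of A: guard for len in [2,3], then one loop over range(len-2)
-- taking max of stones[i+2]-stones[i] (indices are provably in range, so pyGetD 0 is exact)
def maxJump (stones : List Int) : Int :=
  if stones.length = 2 ∨ stones.length = 3 then
    PySem.List.pyGetD stones (-1) 0 - PySem.List.pyGetD stones 0 0
  else
    (PySem.List.pyRange 0 ((stones.length : Int) - 2) 1).foldl
      (fun mj i =>
        max mj (PySem.List.pyGetD stones (i + 2) 0 - PySem.List.pyGetD stones i 0)) 0

-- ===== PORT B =====
-- the bucket loop of Source B: state (ev, od, take_ev), appending to one bucket and flipping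
def splitGo : List Int → List Int → List Int → Bool → List Int × List Int
  | [], ev, od, _ => (ev, od)
  | x :: xs, ev, od, b =>
    if b then splitGo xs (ev ++ [x]) od false else splitGo xs ev (od ++ [x]) true

def maxJump_alt (stones : List Int) : Int :=
  if stones.length = 2 ∨ stones.length = 3 then
    PySem.List.pyGetD stones (-1) 0 - PySem.List.pyGetD stones 0 0
  else
    let p := splitGo stones [] [] true
    let best := (p.1.zip p.1.tail).foldl (fun b q => max b (q.2 - q.1)) 0
    (p.2.zip p.2.tail).foldl (fun b q => max b (q.2 - q.1)) best

-- ===== PRECONDITION & SPEC =====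
def Spec_maxJump (stones : List Int) (out : Int) : Prop := out = maxJump_alt stones
instance (stones : List Int) (out : Int) : Decidable (Spec_maxJump stones out) := by unfold Spec_maxJump; infer_instance

-- ===== CLAIM (what is proved, stated in full; the proofs are below) =====
def Claim_equal_maxJump : Prop := ∀ (stones : List Int), Dom_maxJump stones → Spec_maxJump stones (maxJump stones)

-- ===== LEMMAS AND PROOFS =====

-- the even- and odd-position subsequences (proof-side characterisation of splitGo)
def evensL : List Int → List Int
  | [] => []
  | [x] => [x]
  | x :: _ :: xs => x :: evensL xs

def oddsL (l : List Int) : List Int := evensL (l.drop 1)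

lemma evensL_cons (x : Int) (xs : List Int) : evensL (x :: xs) = x :: oddsL xs := by
  cases xs <;> simp [evensL, oddsL]

lemma oddsL_cons (x : Int) (xs : List Int) : oddsL (x :: xs) = evensL xs := rfl

lemma splitGo_spec (xs : List Int) : ∀ ev od : List Int,
    splitGo xs ev od true = (ev ++ evensL xs, od ++ oddsL xs) ∧
    splitGo xs ev od false = (ev ++ oddsL xs, od ++ evensL xs) := by
  induction xs with
  | nil => intro ev od; simp [splitGo, evensL, oddsL]
  | cons x xs ih =>
    intro ev od
    constructor
    · simp only [splitGo, if_true, evensL_cons, oddsL_cons]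
      rw [(ih (ev ++ [x]) od).2]
      simp
    · simp only [splitGo, Bool.false_eq_true, if_false, evensL_cons, oddsL_cons]
      rw [(ih ev (od ++ [x])).1]
      simp

-- adjacent gaps of a list
def gapsL (l : List Int) : List Int := List.zipWith (fun a c => c - a) l l.tail

-- A's difference list
lemma map_pyRange_eq_zipWith (s : List Int) :
    (PySem.List.pyRange 0 ((s.length : Int) - 2) 1).map
      (fun i => PySem.List.pyGetD s (i + 2) 0 - PySem.List.pyGetD s i 0)
    = List.zipWith (fun a c => c - a) s (s.drop 2) := by
  apply List.ext_getElem
  · simp [PySem.List.length_pyRange_one]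
    omega
  · intro k h1 h2
    have hk : k < ((s.length : Int) - 0 - 2).toNat := by
      simpa [PySem.List.length_pyRange_one] using h1
    have hks : k + 2 < s.length := by omega
    simp only [List.getElem_map, PySem.List.getElem_pyRange_one, List.getElem_zipWith,
      List.getElem_drop]
    have e1 : (0 : Int) + (k : Int) + 2 = ((k + 2 : Nat) : Int) := by push_cast; ring
    have e2 : (0 : Int) + (k : Int) = ((k : Nat) : Int) := by ring
    rw [e1, e2, PySem.List.pyGetD_natCast, PySem.List.pyGetD_natCast,
      List.getD_eq_getElem _ _ (by omega), List.getD_eq_getElem _ _ (by omega)]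
    have e3 : 2 + k = k + 2 := by omega
    simp only [e3]

-- the interleaving permutation: two-apart gaps of s = adjacent gaps of its two alternating subsequences
lemma twoApart_perm (s : List Int) :
    (List.zipWith (fun a c => c - a) s (s.drop 2)).Perm
      (gapsL (evensL s) ++ gapsL (oddsL s)) := by
  induction s with
  | nil => simp [gapsL, evensL, oddsL]
  | cons x xs ih =>
    rw [evensL_cons, oddsL_cons]
    match xs, ih with
    | [], _ => simp [gapsL, evensL, oddsL]
    | [b], _ => simp [gapsL, evensL, oddsL]
    | b :: c :: u, ih =>
      have hodds : oddsL (b :: c :: u) = c :: oddsL u := by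
        rw [oddsL_cons, evensL_cons]
      rw [hodds]
      have hL : List.zipWith (fun a c => c - a) (x :: b :: c :: u) ((x :: b :: c :: u).drop 2)
          = (c - x) :: List.zipWith (fun a c => c - a) (b :: c :: u) ((b :: c :: u).drop 2) := by
        cases u <;> simp
      have hR : gapsL (x :: c :: oddsL u) = (c - x) :: gapsL (c :: oddsL u) := by
        simp [gapsL]
      rw [hL, hR, ← hodds]
      exact List.Perm.cons _ (ih.trans List.perm_append_comm)

-- a max-fold over pairs is a max-fold over the gap list
lemma foldl_pairs_eq : ∀ (l : List Int) (m : Int),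
    (l.zip l.tail).foldl (fun b q => max b (q.2 - q.1)) m = (gapsL l).foldl max m
  | [], _ => rfl
  | [_], _ => rfl
  | a :: b :: t, m => by
    have h := foldl_pairs_eq (b :: t) (max m (b - a))
    simpa [gapsL] using h

lemma maxJump_body (s : List Int) (h : ¬ (s.length = 2 ∨ s.length = 3)) :
    maxJump s = maxJump_alt s := by
  haveI : RightCommutative (max : Int → Int → Int) := ⟨fun b a c => max_right_comm b a c⟩
  have hA : maxJump s = (List.zipWith (fun a c => c - a) s (s.drop 2)).foldl max 0 := by
    rw [maxJump, if_neg h, ← map_pyRange_eq_zipWith, List.foldl_map]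
  have hsplit : splitGo s [] [] true = (evensL s, oddsL s) := by
    have := (splitGo_spec s [] []).1
    simpa using this
  have hB : maxJump_alt s = (gapsL (evensL s) ++ gapsL (oddsL s)).foldl max 0 := by
    rw [maxJump_alt, if_neg h]
    simp only [hsplit, foldl_pairs_eq, List.foldl_append]
  rw [hA, hB]
  exact (twoApart_perm s).foldl_eq 0

theorem maxJump_spec : Claim_equal_maxJump := by
  intro s _
  unfold Spec_maxJump
  by_cases h : s.length = 2 ∨ s.length = 3
  · simp [maxJump, maxJump_alt, h]
  · exact maxJump_body s h
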